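-- pv_equiv track=rewrite | github.com/zane-xu-ai/rag_law | src/chunking/breakpoint_embed.py | _merge_ranges_min_len
-- ===== SOURCE A (Python) =====
-- def _merge_ranges_min_len(
--     ranges: list[tuple[int, int]],
--     min_chars: int,
-- ) -> list[tuple[int, int]]:
--     """相邻区间向前合并，直到当前段长度 ≥ min_chars 或已无后继。"""
--     if not ranges:
--         return []
--     out: list[tuple[int, int]] = []
--     i = 0
--     while i < len(ranges):
--         s, e = ranges[i]
--         j = i
--         while e - s < min_chars and j + 1 < len(ranges):
--             j += 1
--             e = ranges[j][1]
--         out.append((s, e))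
--         i = j + 1
--     return out
-- ===== SOURCE B (Python) =====
-- def _merge_ranges_min_len(
--     ranges: list[tuple[int, int]],
--     min_chars: int,
-- ) -> list[tuple[int, int]]:
--     """Single flat pass keeping an 'open segment' accumulator; flush trailing segment."""
--     out: list[tuple[int, int]] = []
--     open_seg = None
--     for a, b in ranges:
--         s, e = (a, b) if open_seg is None else (open_seg[0], b)
--         if e - s >= min_chars:
--             out.append((s, e))
--             open_seg = None
--         else:
--             open_seg = (s, e)
--     if open_seg is not None:
--         out.append(open_seg)
--     return out
-- ===== Notes on version B (the rewrite author's own statement) =====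
-- stated objective: simpler
-- what changed: Replaces A's nested while loops with pointer-jumping indices i/j by one flat loop over the ranges that keeps a single open-segment accumulator, flushed after the loop.
import Mathlib
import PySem

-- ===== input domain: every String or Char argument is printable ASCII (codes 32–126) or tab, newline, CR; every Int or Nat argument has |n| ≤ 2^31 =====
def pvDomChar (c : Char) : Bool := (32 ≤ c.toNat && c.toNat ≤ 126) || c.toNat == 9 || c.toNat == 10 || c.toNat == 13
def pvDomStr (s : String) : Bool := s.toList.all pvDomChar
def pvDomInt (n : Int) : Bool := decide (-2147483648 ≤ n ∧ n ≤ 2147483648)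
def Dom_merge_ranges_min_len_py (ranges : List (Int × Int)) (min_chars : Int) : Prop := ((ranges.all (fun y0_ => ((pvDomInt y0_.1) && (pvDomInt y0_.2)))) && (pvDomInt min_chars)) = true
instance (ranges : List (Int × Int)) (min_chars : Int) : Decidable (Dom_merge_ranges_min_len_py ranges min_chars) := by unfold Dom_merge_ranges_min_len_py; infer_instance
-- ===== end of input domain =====

-- B replaces A's nested index-jumping while loops by one flat fold with an open-segment accumulator (simpler decomposition, same O(n) cost).

-- ===== PORT A =====
-- inner while loop: while e - s < min_chars and j + 1 < len(ranges): j += 1; e = ranges[j][1]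
def mergeInnerA (ranges : List (Int × Int)) (mc s e : Int) (j : Nat) : Int × Nat :=
  if h : e - s < mc ∧ j + 1 < ranges.length then
    mergeInnerA ranges mc s (ranges[j+1].2) (j+1)
  else (e, j)
termination_by ranges.length - j

-- the inner loop only moves j forward (needed for the outer loop's termination)
theorem mergeInnerA_le (ranges : List (Int × Int)) (mc s e : Int) (j : Nat) :
    j ≤ (mergeInnerA ranges mc s e j).2 := by
  unfold mergeInnerA
  split
  · have := mergeInnerA_le ranges mc s (ranges[j+1]'(by omega)).2 (j+1)
    omega
  · simp
termination_by ranges.length - j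

-- outer while loop: while i < len(ranges): s,e = ranges[i]; j = i; <inner>; out.append((s,e)); i = j+1
def mergeOuterA (ranges : List (Int × Int)) (mc : Int) (i : Nat) : List (Int × Int) :=
  if h : i < ranges.length then
    let se := ranges[i]
    let p := mergeInnerA ranges mc se.1 se.2 i
    (se.1, p.1) :: mergeOuterA ranges mc (p.2 + 1)
  else []
termination_by ranges.length - i
decreasing_by
  have := mergeInnerA_le ranges mc (ranges[i]'h).1 (ranges[i]'h).2 i
  omega

def merge_ranges_min_len_py (ranges : List (Int × Int)) (min_chars : Int) : List (Int × Int) :=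
  if ranges = [] then [] else mergeOuterA ranges min_chars 0

-- ===== PORT B =====
-- one step of Source B's flat loop: open/extend the segment, emit and close it once long enough
def mergeStepB (mc : Int) (st : List (Int × Int) × Option (Int × Int)) (ab : Int × Int) :
    List (Int × Int) × Option (Int × Int) :=
  let se : Int × Int := match st.2 with
    | none => ab
    | some o => (o.1, ab.2)
  if se.2 - se.1 ≥ mc then (st.1 ++ [se], none) else (st.1, some se)

def merge_ranges_min_len_py_alt (ranges : List (Int × Int)) (min_chars : Int) : List (Int × Int) :=
  let st := ranges.foldl (mergeStepB min_chars) ([], none)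
  match st.2 with
  | none => st.1
  | some se => st.1 ++ [se]

-- ===== PRECONDITION & SPEC =====
def Spec_merge_ranges_min_len_py (ranges : List (Int × Int)) (min_chars : Int) (out : List (Int × Int)) : Prop := out = merge_ranges_min_len_py_alt ranges min_chars
instance (ranges : List (Int × Int)) (min_chars : Int) (out : List (Int × Int)) : Decidable (Spec_merge_ranges_min_len_py ranges min_chars out) := by unfold Spec_merge_ranges_min_len_py; infer_instance

-- ===== CLAIM (what is proved, stated in full; the proofs are below) =====
def Claim_equal_merge_ranges_min_len_py : Prop := ∀ (ranges : List (Int × Int)) (min_chars : Int), Dom_merge_ranges_min_len_py ranges min_chars → Spec_merge_ranges_min_len_py ranges min_chars (merge_ranges_min_len_py ranges min_chars)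

-- ===== LEMMAS AND PROOFS =====

-- reference function both ports are reduced to: one segment starting at s, currently ending at e
def mergeGo (mc s e : Int) : List (Int × Int) → List (Int × Int)
  | [] => [(s, e)]
  | (a, b) :: r => if e - s < mc then mergeGo mc s b r else (s, e) :: mergeGo mc a b r

def mergeRef (mc : Int) : List (Int × Int) → List (Int × Int)
  | [] => []
  | (s, e) :: r => mergeGo mc s e r

theorem mergeGo_of_ge (mc s e : Int) (rest : List (Int × Int)) (h : ¬ e - s < mc) :
    mergeGo mc s e rest = (s, e) :: mergeRef mc rest := by
  cases rest with
  | nil => simp [mergeGo, mergeRef]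
  | cons hd tl => cases hd; simp [mergeGo, mergeRef, h]

theorem outerA_eq (rest : List (Int × Int)) : ∀ (ranges : List (Int × Int)) (mc s e : Int) (j : Nat),
    j < ranges.length → ranges.drop (j+1) = rest →
    ((s, (mergeInnerA ranges mc s e j).1) :: mergeOuterA ranges mc ((mergeInnerA ranges mc s e j).2 + 1))
      = mergeGo mc s e rest := by
  induction rest with
  | nil =>
    intro ranges mc s e j hj hdrop
    have hlen : ranges.length ≤ j + 1 := by
      simpa [List.drop_eq_nil_iff] using hdrop
    rw [mergeInnerA]
    rw [dif_neg (by omega)]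
    simp only []
    rw [mergeOuterA, dif_neg (by omega)]
    simp [mergeGo]
  | cons hd r ih =>
    obtain ⟨a, b⟩ := hd
    intro ranges mc s e j hj hdrop
    have hj1 : j + 1 < ranges.length := by
      by_contra h
      rw [List.drop_eq_nil_iff.mpr (by omega)] at hdrop
      simp at hdrop
    have hget : ranges[j+1]'hj1 = (a, b) := by
      have h0 : (ranges.drop (j+1))[0]? = some (a, b) := by rw [hdrop]; rfl
      rw [List.getElem?_drop] at h0
      have := List.getElem?_eq_getElem (l := ranges) (i := j + 1) hj1
      rw [show j + 1 + 0 = j + 1 from rfl] at h0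
      rw [this] at h0
      exact Option.some.inj h0
    have hdrop2 : ranges.drop (j+2) = r := by
      have : ranges.drop (j+2) = (ranges.drop (j+1)).drop 1 := by
        rw [List.drop_drop]
      rw [this, hdrop]; rfl
    rw [mergeInnerA]
    by_cases hc : e - s < mc
    · rw [dif_pos ⟨hc, hj1⟩]
      rw [show (ranges[j+1]'hj1).2 = b by rw [hget]]
      rw [ih ranges mc s b (j+1) hj1 hdrop2]
      simp [mergeGo, hc]
    · rw [dif_neg (by intro h; exact hc h.1)]
      simp only []
      rw [mergeOuterA, dif_pos hj1]
      simp only [hget]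
      rw [ih ranges mc a b (j+1) hj1 hdrop2]
      simp [mergeGo, hc]

theorem portA_eq_ref (ranges : List (Int × Int)) (mc : Int) :
    merge_ranges_min_len_py ranges mc = mergeRef mc ranges := by
  cases ranges with
  | nil => rfl
  | cons hd rest =>
    obtain ⟨s, e⟩ := hd
    show mergeOuterA ((s,e) :: rest) mc 0 = mergeGo mc s e rest
    rw [mergeOuterA, dif_pos (by simp)]
    exact outerA_eq rest ((s,e) :: rest) mc s e 0 (by simp) rfl

-- flush of the fold state
def mergeFlush (st : List (Int × Int) × Option (Int × Int)) : List (Int × Int) :=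
  match st.2 with
  | none => st.1
  | some se => st.1 ++ [se]

theorem foldB_eq (rest : List (Int × Int)) : ∀ (mc : Int) (out : List (Int × Int)),
    (mergeFlush (rest.foldl (mergeStepB mc) (out, none)) = out ++ mergeRef mc rest) ∧
    (∀ s e : Int, e - s < mc →
      mergeFlush (rest.foldl (mergeStepB mc) (out, some (s, e))) = out ++ mergeGo mc s e rest) := by
  induction rest with
  | nil => intro mc out; exact ⟨by simp [mergeFlush, mergeRef], fun s e _ => by simp [mergeFlush, mergeGo]⟩
  | cons hd r ih =>
    obtain ⟨a, b⟩ := hd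
    intro mc out
    constructor
    · show mergeFlush (r.foldl (mergeStepB mc) (mergeStepB mc (out, none) (a, b))) = _
      by_cases hc : b - a ≥ mc
      · have : mergeStepB mc (out, none) (a, b) = (out ++ [(a, b)], none) := by
          simp [mergeStepB, hc]
        rw [this, (ih mc (out ++ [(a,b)])).1, mergeRef]
        rw [mergeGo_of_ge mc a b r (by omega)]
        simp
      · have : mergeStepB mc (out, none) (a, b) = (out, some (a, b)) := by
          simp [mergeStepB]; omega
        rw [this, (ih mc out).2 a b (by omega)]
        rfl
    · intro s e hinv
      show mergeFlush (r.foldl (mergeStepB mc) (mergeStepB mc (out, some (s, e)) (a, b))) = _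
      by_cases hc : b - s ≥ mc
      · have : mergeStepB mc (out, some (s, e)) (a, b) = (out ++ [(s, b)], none) := by
          simp [mergeStepB, hc]
        rw [this, (ih mc (out ++ [(s,b)])).1]
        rw [show mergeGo mc s e ((a,b)::r) = mergeGo mc s b r by simp [mergeGo, hinv]]
        rw [mergeGo_of_ge mc s b r (by omega)]
        simp
      · have : mergeStepB mc (out, some (s, e)) (a, b) = (out, some (s, b)) := by
          simp [mergeStepB]; omega
        rw [this, (ih mc out).2 s b (by omega)]
        simp [mergeGo, hinv]

theorem portB_eq_ref (ranges : List (Int × Int)) (mc : Int) :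
    merge_ranges_min_len_py_alt ranges mc = mergeRef mc ranges := by
  have := (foldB_eq ranges mc []).1
  simpa [merge_ranges_min_len_py_alt, mergeFlush] using this

-- ===== VERDICT (by name: the statement is the Claim_ definition above) =====
theorem merge_ranges_min_len_py_spec : Claim_equal_merge_ranges_min_len_py := by
  intro ranges mc _
  unfold Spec_merge_ranges_min_len_py
  rw [portA_eq_ref, portB_eq_ref]
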